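-- pv_equiv track=rewrite | github.com/jonasneustock/virtual_shelly3empro | app.py | _encode_ascii_registers
-- ===== SOURCE A (Python) =====
-- from typing import Dict, Any, Optional, List, Tuple, Deque
--
-- def _encode_ascii_registers(text: str, register_count: int) -> List[int]:
--     data = (text or "").encode("ascii", errors="ignore")[: register_count * 2]
--     data = data.ljust(register_count * 2, b"\x00")
--     regs: List[int] = []
--     for i in range(register_count):
--         hi = data[2 * i]
--         lo = data[2 * i + 1]
--         regs.append((hi << 8) | lo)
--     return regs
-- ===== SOURCE B (Python) =====
-- def _encode_ascii_registers(text, register_count):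
--     # Different route: go through a hexadecimal text representation.  The truncated
--     # byte string is rendered as hex (two digits per byte), right-padded with '0'
--     # digits, and each register is obtained by parsing one 4-hex-digit group --
--     # no zero-padded byte buffer, no per-byte indexing, no shifts or bit-ORs.
--     if register_count <= 0:
--         return []
--     hx = (text or "").encode("ascii", errors="ignore")[: 2 * register_count].hex().ljust(4 * register_count, "0")
--     return [int(hx[4 * i : 4 * i + 4], 16) for i in range(register_count)]
-- ===== Notes on version B (the rewrite author's own statement) =====
-- stated objective: alternative
-- what changed: B renders the truncated byte string as a hexadecimal string, pads it with '0' digits, and parses each register as a 4-hex-digit group by radix conversion, replacing A's zero-padded byte buffer with indexed byte pairs combined by shift/bit-OR.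
import Mathlib
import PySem

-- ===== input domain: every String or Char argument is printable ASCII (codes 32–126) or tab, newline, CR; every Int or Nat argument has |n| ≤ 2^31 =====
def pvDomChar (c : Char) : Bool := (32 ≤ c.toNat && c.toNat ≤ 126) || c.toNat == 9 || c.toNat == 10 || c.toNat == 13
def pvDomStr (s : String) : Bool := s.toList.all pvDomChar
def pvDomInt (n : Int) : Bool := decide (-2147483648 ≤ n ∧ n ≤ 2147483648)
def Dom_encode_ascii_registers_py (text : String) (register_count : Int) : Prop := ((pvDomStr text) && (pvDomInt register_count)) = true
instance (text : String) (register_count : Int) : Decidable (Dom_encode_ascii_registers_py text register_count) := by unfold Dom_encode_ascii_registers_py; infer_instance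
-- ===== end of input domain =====

-- B renders the truncated bytes as a hexadecimal string padded with '0' digits and parses
-- each register as a 4-hex-digit group, instead of A's padded buffer + indexed bit-ORs.

-- ===== PORT A =====
def encode_ascii_registers_py (text : String) (register_count : Int) : List Int :=
  -- (text or "").encode("ascii", errors="ignore"): byte values of the chars, code points ≥ 128 dropped
  let data0 : List Int := (text.toList.filter (fun c => c.toNat ≤ 127)).map (fun c => (c.toNat : Int))
  -- [: register_count * 2]
  let data1 := PySem.List.slice data0 none (some (register_count * 2))
  -- .ljust(register_count * 2, b"\x00")  (no-op when the width is ≤ the length)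
  let data := data1 ++ List.replicate ((register_count * 2).toNat - data1.length) (0 : Int)
  (PySem.List.pyRange 0 register_count 1).foldl
    (fun regs i =>
      let hi := PySem.List.pyGetD data (2 * i) 0
      let lo := PySem.List.pyGetD data (2 * i + 1) 0
      regs ++ [PySem.Int.bor (hi <<< (8 : Nat)) lo]) []

-- ===== PORT B =====
-- bytes.hex(): two lowercase hex digits per byte (exact for byte values 0..255)
def pvHexDigit (n : Nat) : Char := Char.ofNat (if n < 10 then 48 + n else 87 + n)
def pvByteHex (b : Int) : List Char := [pvHexDigit (b.toNat / 16), pvHexDigit (b.toNat % 16)]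
-- int(s, 16): radix-16 parse (exact for nonempty strings of hex digits 0-9/a-f)
def pvHexVal (c : Char) : Nat := if c.toNat < 58 then c.toNat - 48 else c.toNat - 87
def pvParseHex (cs : List Char) : Int := ((cs.foldl (fun a c => a * 16 + pvHexVal c) 0 : Nat) : Int)

def encode_ascii_registers_py_alt (text : String) (register_count : Int) : List Int :=
  if register_count ≤ 0 then []
  else
    -- .encode("ascii", "ignore") as in A, then [: 2 * register_count], then .hex()
    let bs : List Int := (text.toList.filter (fun c => c.toNat ≤ 127)).map (fun c => (c.toNat : Int))
    let hx0 := (PySem.List.slice bs none (some (2 * register_count))).flatMap pvByteHex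
    -- .ljust(4 * register_count, "0")
    let hx := hx0 ++ List.replicate ((4 * register_count).toNat - hx0.length) '0'
    -- hx[4*i : 4*i+4] with nonnegative in-range indices: drop/take is exact here
    (List.range register_count.toNat).map (fun i => pvParseHex ((hx.drop (4 * i)).take 4))

-- ===== PRECONDITION & SPEC =====
def Spec_encode_ascii_registers_py (text : String) (register_count : Int) (out : List Int) : Prop := out = encode_ascii_registers_py_alt text register_count
instance (text : String) (register_count : Int) (out : List Int) : Decidable (Spec_encode_ascii_registers_py text register_count out) := by unfold Spec_encode_ascii_registers_py; infer_instance

-- ===== CLAIM (what is proved, stated in full; the proofs are below) =====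
def Claim_equal_encode_ascii_registers_py : Prop := ∀ (text : String) (register_count : Int), Dom_encode_ascii_registers_py text register_count → Spec_encode_ascii_registers_py text register_count (encode_ascii_registers_py text register_count)

-- ===== LEMMAS AND PROOFS =====

-- Common intermediate form: the register pairs with implicit zero padding
def pvNextRegs : Nat → List Int → List Int
  | 0, _ => []
  | n + 1, bs => (bs.headD 0 * 256 + bs.tail.headD 0) :: pvNextRegs n bs.tail.tail

-- A's buffer after slicing to 2*n bytes and zero-padding back to 2*n
def pvPad (n : Nat) (bs : List Int) : List Int :=
  bs.take (2 * n) ++ List.replicate (2 * n - (bs.take (2 * n)).length) 0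

theorem pv_two_mul_lor (x y r : Nat) (hr : r < 2) :
    (2 * x) ||| (2 * y + r) = 2 * (x ||| y) + r := by
  have h0 := Nat.lor_bit false x false y
  have h1 := Nat.lor_bit false x true y
  interval_cases r
  · simpa [Nat.bit] using h0
  · simpa [Nat.bit] using h1

theorem pv_shl_or (k : Nat) : ∀ a b : Nat, b < 2 ^ k → (a <<< k ||| b) = a * 2 ^ k + b := by
  induction k with
  | zero => intro a b h; interval_cases b; simp
  | succ k ih =>
    intro a b h
    have hb2 : b / 2 < 2 ^ k := by omega
    have h1 : a <<< (k + 1) = 2 * (a <<< k) := by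
      simp [Nat.shiftLeft_eq, pow_succ]; ring
    have h2 : b = 2 * (b / 2) + b % 2 := by omega
    calc a <<< (k + 1) ||| b
        = (2 * (a <<< k)) ||| (2 * (b / 2) + b % 2) := by rw [h1, ← h2]
      _ = 2 * ((a <<< k) ||| (b / 2)) + b % 2 := pv_two_mul_lor _ _ _ (by omega)
      _ = 2 * (a * 2 ^ k + b / 2) + b % 2 := by rw [ih a (b / 2) hb2]
      _ = a * 2 ^ (k + 1) + b := by
          have hx : a * 2 ^ (k + 1) = 2 * (a * 2 ^ k) := by rw [pow_succ]; ring
          omega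

theorem pv_bor_byte (h l : Int) (hh : 0 ≤ h) (hl0 : 0 ≤ l) (hl : l < 256) :
    PySem.Int.bor (h <<< (8 : Nat)) l = h * 256 + l := by
  obtain ⟨a, rfl⟩ := Int.eq_ofNat_of_zero_le hh
  obtain ⟨b, rfl⟩ := Int.eq_ofNat_of_zero_le hl0
  have hb : b < 256 := by exact_mod_cast hl
  have hsh : ((a : Int) <<< (8 : Nat)) = ((a <<< 8 : Nat) : Int) := by
    simp [Int.natCast_shiftLeft]
  rw [hsh, PySem.Int.bor_natCast, pv_shl_or 8 a b (by norm_num [hb])]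
  push_cast; ring

theorem pv_pad_cons (n : Nat) (bs : List Int) :
    pvPad (n + 1) bs = bs.headD 0 :: bs.tail.headD 0 :: pvPad n bs.tail.tail := by
  have h2 : 2 * (n + 1) = (2 * n) + 1 + 1 := by ring
  match bs with
  | [] => simp [pvPad, h2, List.replicate_succ]
  | [b] => simp [pvPad, h2, List.replicate_succ]
  | b :: b' :: rest => simp [pvPad, h2]

theorem pv_regs_eq (n : Nat) : ∀ bs : List Int, (∀ x ∈ bs, 0 ≤ x ∧ x < 256) →
    (List.range n).map (fun k =>
        PySem.Int.bor (((pvPad n bs).getD (2 * k) 0) <<< (8 : Nat)) ((pvPad n bs).getD (2 * k + 1) 0))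
      = pvNextRegs n bs := by
  induction n with
  | zero => intro bs _; simp [pvNextRegs]
  | succ n ih =>
    intro bs hb
    have hh : 0 ≤ bs.headD 0 ∧ bs.headD 0 < 256 := by
      cases bs with
      | nil => norm_num
      | cons a t => exact hb a (by simp)
    have hl : 0 ≤ bs.tail.headD 0 ∧ bs.tail.headD 0 < 256 := by
      cases bs with
      | nil => norm_num
      | cons a t =>
        cases t with
        | nil => norm_num
        | cons a' t' => exact hb a' (by simp)
    have hb' : ∀ x ∈ bs.tail.tail, 0 ≤ x ∧ x < 256 := fun x hx =>
      hb x (List.mem_of_mem_tail (List.mem_of_mem_tail hx))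
    rw [List.range_succ_eq_map, List.map_cons, List.map_map, pv_pad_cons,
      show pvNextRegs (n + 1) bs = (bs.headD 0 * 256 + bs.tail.headD 0) :: pvNextRegs n bs.tail.tail from rfl]
    congr 1
    · simp only [Nat.mul_zero, List.getD_cons_zero, Nat.zero_add, List.getD_cons_succ]
      exact pv_bor_byte _ _ hh.1 hl.1 hl.2
    · rw [← ih bs.tail.tail hb']
      apply List.map_congr_left
      intro k _
      have e1 : 2 * (Nat.succ k) = (2 * k) + 1 + 1 := by omega
      simp [Function.comp, e1]

-- A's port equals the pair list with implicit zero padding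
theorem pvA_eq (text : String) (n : Nat) :
    encode_ascii_registers_py text (n : Int)
      = pvNextRegs n ((text.toList.filter (fun c => c.toNat ≤ 127)).map (fun c => (c.toNat : Int))) := by
  unfold encode_ascii_registers_py
  set bs : List Int := (text.toList.filter (fun c => c.toNat ≤ 127)).map (fun c => (c.toNat : Int)) with hbs
  have hb : ∀ x ∈ bs, 0 ≤ x ∧ x < 256 := by
    intro x hx
    rw [hbs] at hx
    obtain ⟨c, hc, rfl⟩ := List.mem_map.mp hx
    have := (List.mem_filter.mp hc).2
    constructor
    · positivity
    · have : c.toNat ≤ 127 := by simpa using this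
      exact_mod_cast Nat.lt_of_le_of_lt this (by norm_num)
  have hcast : (n : Int) * 2 = ((2 * n : Nat) : Int) := by push_cast; ring
  rw [hcast]
  simp only [PySem.List.slice_to_natCast, Int.toNat_natCast]
  have hdata : bs.take (2 * n) ++
      List.replicate (2 * n - (bs.take (2 * n)).length) (0 : Int)
      = pvPad n bs := by
    simp [pvPad]
  rw [hdata]
  rw [PySem.List.foldl_append_singleton_eq_map
    (f := fun i => PySem.Int.bor ((PySem.List.pyGetD (pvPad n bs) (2 * i) 0) <<< (8 : Nat))
      (PySem.List.pyGetD (pvPad n bs) (2 * i + 1) 0))]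
  rw [PySem.List.pyRange_one]
  simp only [Int.sub_zero, Int.toNat_natCast, List.map_map, Int.zero_add, Int.toNat_natCast]
  rw [← pv_regs_eq n bs hb]
  apply List.map_congr_left
  intro k _
  simp only [Function.comp]
  rw [show (2 : Int) * (k : Int) = ((2 * k : Nat) : Int) by push_cast; ring,
    show ((2 * k : Nat) : Int) + 1 = ((2 * k + 1 : Nat) : Int) by push_cast; ring,
    PySem.List.pyGetD_natCast, PySem.List.pyGetD_natCast]

-- ---------- B-side characterisation ----------

theorem pvHexVal_digit (m : Nat) (hm : m < 16) : pvHexVal (pvHexDigit m) = m := by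
  interval_cases m <;> decide

theorem pv_parse_pair (h l : Int) (hh0 : 0 ≤ h) (hh : h < 256) (hl0 : 0 ≤ l) (hl : l < 256)
    (rest : List Char) :
    pvParseHex (((pvByteHex h ++ pvByteHex l ++ rest).drop (4 * 0)).take 4) = h * 256 + l := by
  obtain ⟨a, rfl⟩ := Int.eq_ofNat_of_zero_le hh0
  obtain ⟨b, rfl⟩ := Int.eq_ofNat_of_zero_le hl0
  have ha : a < 256 := by exact_mod_cast hh
  have hb : b < 256 := by exact_mod_cast hl
  show pvParseHex (((pvByteHex a ++ pvByteHex b ++ rest).drop 0).take 4) = (a : Int) * 256 + b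
  simp only [pvByteHex, Int.toNat_natCast, List.drop_zero, List.cons_append, List.nil_append,
    List.take_succ_cons, List.take_zero]
  unfold pvParseHex
  simp only [List.foldl_cons, List.foldl_nil]
  rw [pvHexVal_digit (a / 16) (by omega), pvHexVal_digit (a % 16) (by omega),
    pvHexVal_digit (b / 16) (by omega), pvHexVal_digit (b % 16) (by omega)]
  have : (((0 * 16 + a / 16) * 16 + a % 16) * 16 + b / 16) * 16 + b % 16 = a * 256 + b := by omega
  rw [this]
  push_cast; ring

-- the hex string of the 2n-byte padded buffer, group i parsed, is register i
theorem pv_hex_regs (n : Nat) : ∀ bs : List Int, (∀ x ∈ bs, 0 ≤ x ∧ x < 256) →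
    (List.range n).map (fun i => pvParseHex ((((pvPad n bs).flatMap pvByteHex).drop (4 * i)).take 4))
      = pvNextRegs n bs := by
  induction n with
  | zero => intro bs _; simp [pvNextRegs]
  | succ n ih =>
    intro bs hb
    have hh : 0 ≤ bs.headD 0 ∧ bs.headD 0 < 256 := by
      cases bs with
      | nil => norm_num
      | cons a t => exact hb a (by simp)
    have hl : 0 ≤ bs.tail.headD 0 ∧ bs.tail.headD 0 < 256 := by
      cases bs with
      | nil => norm_num
      | cons a t =>
        cases t with
        | nil => norm_num
        | cons a' t' => exact hb a' (by simp)
    have hb' : ∀ x ∈ bs.tail.tail, 0 ≤ x ∧ x < 256 := fun x hx =>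
      hb x (List.mem_of_mem_tail (List.mem_of_mem_tail hx))
    have hflat : (pvPad (n + 1) bs).flatMap pvByteHex
        = pvByteHex (bs.headD 0) ++ pvByteHex (bs.tail.headD 0)
          ++ (pvPad n bs.tail.tail).flatMap pvByteHex := by
      rw [pv_pad_cons]
      simp [List.flatMap_cons, List.append_assoc]
    rw [List.range_succ_eq_map, List.map_cons, List.map_map, hflat,
      show pvNextRegs (n + 1) bs
        = (bs.headD 0 * 256 + bs.tail.headD 0) :: pvNextRegs n bs.tail.tail from rfl]
    congr 1
    · exact pv_parse_pair _ _ hh.1 hh.2 hl.1 hl.2 _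
    · rw [← ih bs.tail.tail hb']
      apply List.map_congr_left
      intro k _
      have hdrop : ∀ cs : List Char,
          (pvByteHex (bs.headD 0) ++ pvByteHex (bs.tail.headD 0) ++ cs).drop (4 * (k + 1))
            = cs.drop (4 * k) := by
        intro cs
        simp only [pvByteHex, List.cons_append, List.nil_append]
        rw [show 4 * (k + 1) = 4 * k + 1 + 1 + 1 + 1 by ring]
        simp [List.drop_succ_cons]
      simp only [Function.comp]
      rw [hdrop]

theorem pvByteHex_zero : pvByteHex 0 = ['0', '0'] := by decide

theorem pv_flatMap_replicate_zero (k : Nat) :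
    (List.replicate k (0 : Int)).flatMap pvByteHex = List.replicate (2 * k) '0' := by
  induction k with
  | zero => simp
  | succ k ih =>
    rw [List.replicate_succ, List.flatMap_cons, ih, pvByteHex_zero,
      show 2 * (k + 1) = (2 * k) + 1 + 1 by ring]
    simp [List.replicate_succ]

theorem pv_flatMap_length (l : List Int) : (l.flatMap pvByteHex).length = 2 * l.length := by
  induction l with
  | nil => simp
  | cons a t ih => simp [List.flatMap_cons, ih, pvByteHex]; ring

-- ===== VERDICT (by name: the statement is the Claim_ definition above) =====
theorem encode_ascii_registers_py_spec : Claim_equal_encode_ascii_registers_py := by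
  intro text register_count _
  unfold Spec_encode_ascii_registers_py
  rcases (by omega : register_count ≤ 0 ∨ 0 < register_count) with hle | hpos
  · rw [encode_ascii_registers_py, encode_ascii_registers_py_alt]
    rw [PySem.List.pyRange_one_eq_nil hle]
    simp [hle]
  · obtain ⟨n, hn⟩ : ∃ n : Nat, register_count = (n : Int) :=
      ⟨register_count.toNat, (Int.toNat_of_nonneg (le_of_lt hpos)).symm⟩
    subst hn
    rw [pvA_eq]
    set bs : List Int := (text.toList.filter (fun c => c.toNat ≤ 127)).map (fun c => (c.toNat : Int)) with hbs
    have hb : ∀ x ∈ bs, 0 ≤ x ∧ x < 256 := by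
      intro x hx
      rw [hbs] at hx
      obtain ⟨c, hc, rfl⟩ := List.mem_map.mp hx
      have := (List.mem_filter.mp hc).2
      constructor
      · positivity
      · have : c.toNat ≤ 127 := by simpa using this
        exact_mod_cast Nat.lt_of_le_of_lt this (by norm_num)
    rw [encode_ascii_registers_py_alt]
    rw [if_neg (by omega)]
    have hcast2 : (2 : Int) * (n : Int) = ((2 * n : Nat) : Int) := by push_cast; ring
    rw [hcast2]
    simp only [PySem.List.slice_to_natCast, Int.toNat_natCast]
    have hlen : ((bs.take (2 * n)).flatMap pvByteHex).length = 2 * (bs.take (2 * n)).length :=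
      pv_flatMap_length _
    have hcast4 : ((4 : Int) * (n : Int)).toNat = 4 * n := by
      rw [show (4 : Int) * (n : Int) = ((4 * n : Nat) : Int) by push_cast; ring, Int.toNat_natCast]
    have hx_eq : (bs.take (2 * n)).flatMap pvByteHex
        ++ List.replicate (((4 : Int) * (n : Int)).toNat
              - ((bs.take (2 * n)).flatMap pvByteHex).length) '0'
        = (pvPad n bs).flatMap pvByteHex := by
      rw [hcast4, hlen, pvPad, List.flatMap_append, pv_flatMap_replicate_zero,
        show 4 * n - 2 * (bs.take (2 * n)).length
          = 2 * (2 * n - (bs.take (2 * n)).length) by omega]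
    rw [hx_eq, pv_hex_regs n bs hb]
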